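-- pv_equiv track=rewrite | github.com/padraigkitterick/technitium | scripts/migrate_to_bootstrap5.py | migrate_data_attributes
-- ===== SOURCE A (Python) =====
-- def migrate_data_attributes(html):
--     """Update Bootstrap 3 data attributes to Bootstrap 5."""
--
--     replacements = [
--         ('data-toggle=', 'data-bs-toggle='),
--         ('data-target=', 'data-bs-target='),
--         ('data-dismiss=', 'data-bs-dismiss='),
--         ('data-parent=', 'data-bs-parent='),
--         ('data-slide=', 'data-bs-slide='),
--         ('data-slide-to=', 'data-bs-slide-to='),
--     ]
--
--     changes = {}
--     for old, new in replacements: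
--         count = html.count(old)
--         if count > 0:
--             html = html.replace(old, new)
--             changes[old] = (new, count)
--
--     return html, changes
-- ===== SOURCE B (Python) =====
-- def migrate_data_attributes(html):
--     """Update Bootstrap 3 data attributes to Bootstrap 5 (single left-to-right scan)."""
--
--     olds = ['data-toggle=', 'data-target=', 'data-dismiss=', 'data-parent=',
--             'data-slide=', 'data-slide-to=']
--     replacements = [(old, 'data-bs-' + old[5:]) for old in olds]
--
--     counts = {}
--     out = []
--     i = 0
--     n = len(html)
--     while i < n:
--         for old, new in replacements:
--             if html.startswith(old, i):
--                 out.append(new)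
--                 counts[old] = counts.get(old, 0) + 1
--                 i += len(old)
--                 break
--         else:
--             out.append(html[i])
--             i += 1
--
--     changes = {old: (new, counts[old]) for old, new in replacements if old in counts}
--     return ''.join(out), changes
-- ===== Notes on version B (the rewrite author's own statement) =====
-- stated objective: alternative
-- what changed: A makes six sequential count-then-replace passes over the string (one per attribute); B rewrites and counts all six attributes in a single left-to-right scan and builds the changes dict from the per-pattern counters afterwards.
import Mathlib
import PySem

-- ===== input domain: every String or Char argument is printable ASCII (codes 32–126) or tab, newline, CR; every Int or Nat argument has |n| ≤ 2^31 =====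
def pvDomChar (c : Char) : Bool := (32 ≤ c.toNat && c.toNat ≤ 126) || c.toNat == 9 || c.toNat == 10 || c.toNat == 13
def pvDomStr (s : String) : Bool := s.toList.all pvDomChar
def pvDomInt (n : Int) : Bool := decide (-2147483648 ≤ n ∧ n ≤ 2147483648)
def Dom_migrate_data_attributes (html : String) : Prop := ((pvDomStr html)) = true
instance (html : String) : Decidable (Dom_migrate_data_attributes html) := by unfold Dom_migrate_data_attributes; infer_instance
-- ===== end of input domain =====

-- B replaces A's six sequential count+replace passes by ONE left-to-right scan that rewrites
-- and counts every attribute in a single traversal (objective: alternative single-pass algorithm).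

-- ===== PORT A =====
-- Literal transliteration of A: fold over the six (old, new) pairs; each step counts, then
-- conditionally replaces and records the change in an insertion-ordered dict.
def migrate_data_attributes (html : String) : String × (List (String × String × Int)) :=
  let replacements : List (String × String) :=
    [("data-toggle=", "data-bs-toggle="), ("data-target=", "data-bs-target="),
     ("data-dismiss=", "data-bs-dismiss="), ("data-parent=", "data-bs-parent="),
     ("data-slide=", "data-bs-slide="), ("data-slide-to=", "data-bs-slide-to=")]
  let st := replacements.foldl
    (fun (st : String × PySem.Dict String (String × Int)) p =>
      let count := PySem.Str.count st.1 p.1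
      if 0 < count then
        (PySem.Str.replace st.1 p.1 p.2, st.2.insert p.1 (p.2, (count : Int)))
      else st)
    (html, PySem.Dict.empty)
  (st.1, st.2.items)

-- ===== PORT B =====
-- B-side helpers: the shared pair list, the inner `for old, new in replacements: if
-- html.startswith(old, i)` loop (pvFind), and the while-loop over the string (pvScanGo).
def pvOlds : List String :=
  ["data-toggle=", "data-target=", "data-dismiss=", "data-parent=", "data-slide=", "data-slide-to="]

-- port of `'data-bs-' + old[5:]`
def pvNew (old : String) : String := "data-bs-" ++ PySem.Str.slice old (some 5) none

def pvRepls : List (String × String) := pvOlds.map (fun o => (o, pvNew o))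

def pvFind (ps : List (String × String)) (l : List Char) : Option (String × String) :=
  match ps with
  | [] => none
  | p :: ps' => if p.1.toList.isPrefixOf l then some p else pvFind ps' l

-- cited by pvScanGo's termination proof
theorem pvFind_eq_some_mem {ps : List (String × String)} {l : List Char} {p : String × String}
    (h : pvFind ps l = some p) : p ∈ ps ∧ p.1.toList.isPrefixOf l = true := by
  induction ps with
  | nil => simp [pvFind] at h
  | cons q ps' ih =>
    by_cases hq : q.1.toList.isPrefixOf l
    · simp [pvFind, hq] at h; subst h; exact ⟨List.mem_cons_self, hq⟩
    · simp [pvFind, hq] at h; obtain ⟨h1, h2⟩ := ih h; exact ⟨List.mem_cons_of_mem _ h1, h2⟩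

-- cited by pvScanGo's termination proof
theorem pvRepls_key_pos : ∀ p ∈ pvRepls, 0 < p.1.toList.length := by decide

-- the `while i < n` loop of B: out/counts are the accumulators, `l` is html[i:]
def pvScanGo (l out : List Char) (counts : PySem.Dict String Int) :
    List Char × PySem.Dict String Int :=
  match l with
  | [] => (out, counts)
  | c :: t =>
    match h : pvFind pvRepls (c :: t) with
    | some p => pvScanGo ((c :: t).drop p.1.toList.length) (out ++ p.2.toList)
        (counts.insert p.1 (counts.getD p.1 0 + 1))
    | none => pvScanGo t (out ++ [c]) counts
  termination_by l.length
  decreasing_by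
  · have hmem := (pvFind_eq_some_mem h).1
    have hpos := pvRepls_key_pos p hmem
    simp only [List.length_drop, List.length_cons]
    omega
  · simp

def migrate_data_attributes_alt (html : String) : String × (List (String × String × Int)) :=
  let res := pvScanGo html.toList [] PySem.Dict.empty
  let changes := (pvRepls.filter (fun p => res.2.contains p.1)).map
    (fun p => (p.1, p.2, res.2.getD p.1 0))
  (String.ofList res.1, changes)

-- ===== PRECONDITION & SPEC =====
def Spec_migrate_data_attributes (html : String) (out : String × (List (String × String × Int))) : Prop := out = migrate_data_attributes_alt html
instance (html : String) (out : String × (List (String × String × Int))) : Decidable (Spec_migrate_data_attributes html out) := by unfold Spec_migrate_data_attributes; infer_instance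

-- ===== CLAIM (what is proved, stated in full; the proofs are below) =====
def Claim_equal_migrate_data_attributes : Prop := ∀ (html : String), Dom_migrate_data_attributes html → Spec_migrate_data_attributes html (migrate_data_attributes html)

-- ===== LEMMAS AND PROOFS =====

-- Python-exact single-pattern count/replace, as plain recursions on the char list
def cnt1 (o : List Char) : List Char → Nat
  | [] => 0
  | c :: t => if o.isPrefixOf (c :: t) then 1 + cnt1 o (t.drop (o.length - 1)) else cnt1 o t
  termination_by l => l.length
  decreasing_by all_goals (simp; try omega)

def repl1 (o n : List Char) : List Char → List Char
  | [] => []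
  | c :: t => if o.isPrefixOf (c :: t) then n ++ repl1 o n (t.drop (o.length - 1)) else c :: repl1 o n t
  termination_by l => l.length
  decreasing_by all_goals (simp; try omega)

theorem count_go_eq (o : List Char) (ho : o ≠ []) :
    ∀ fuel l acc, l.length ≤ fuel → PySem.Chars.count.go o fuel l acc = acc + cnt1 o l := by
  intro fuel
  induction fuel with
  | zero => intro l acc h; have : l = [] := by cases l <;> simp_all
            subst this; simp [PySem.Chars.count.go, cnt1]
  | succ n ih =>
    intro l acc h
    cases l with
    | nil => simp [PySem.Chars.count.go, cnt1]
    | cons c t =>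
      have ht : t.length ≤ n := by simp at h; omega
      by_cases hp : o.isPrefixOf (c :: t)
      · have hlen : 0 < o.length := by cases o <;> simp_all
        have hdrop : List.drop o.length (c :: t) = t.drop (o.length - 1) := by
          cases o with
          | nil => simp_all
          | cons a o' => simp
        have hle : (t.drop (o.length - 1)).length ≤ n := by simp; omega
        rw [PySem.Chars.count.go, if_pos hp, hdrop, ih _ _ hle, cnt1, if_pos hp]
        omega
      · rw [PySem.Chars.count.go, if_neg hp, ih _ _ ht, cnt1, if_neg hp]

theorem count_eq_cnt1 (s o : List Char) (ho : o ≠ []) : PySem.Chars.count s o = cnt1 o s := by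
  have : o.isEmpty = false := by cases o <;> simp_all
  rw [PySem.Chars.count, this]
  simp only [Bool.false_eq_true, if_false]
  rw [count_go_eq o ho _ _ _ (le_refl _)]
  omega

theorem replace_go_eq (o n : List Char) (ho : o ≠ []) :
    ∀ fuel l acc, l.length ≤ fuel →
      PySem.Chars.replace.go o n fuel l acc = acc.reverse ++ repl1 o n l := by
  intro fuel
  induction fuel with
  | zero => intro l acc h; have : l = [] := by cases l <;> simp_all
            subst this; simp [PySem.Chars.replace.go, repl1]
  | succ m ih =>
    intro l acc h
    cases l with
    | nil => simp [PySem.Chars.replace.go, repl1]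
    | cons c t =>
      have ht : t.length ≤ m := by simp at h; omega
      by_cases hp : o.isPrefixOf (c :: t)
      · have hlen : 0 < o.length := by cases o <;> simp_all
        have hdrop : List.drop o.length (c :: t) = t.drop (o.length - 1) := by
          cases o with
          | nil => simp_all
          | cons a o' => simp
        have hle : (t.drop (o.length - 1)).length ≤ m := by simp; omega
        rw [PySem.Chars.replace.go, if_pos hp, hdrop, ih _ _ hle, repl1, if_pos hp]
        simp
      · rw [PySem.Chars.replace.go, if_neg hp, ih _ _ ht, repl1, if_neg hp]
        simp

theorem replace_eq_repl1 (s o n : List Char) (ho : o ≠ []) :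
    PySem.Chars.replace s o n = repl1 o n s := by
  have : o.isEmpty = false := by cases o <;> simp_all
  rw [PySem.Chars.replace, this]
  simp only [Bool.false_eq_true, if_false]
  rw [replace_go_eq o n ho _ _ _ (le_refl _)]
  simp

-- A's sequential pipeline, string part only
def seqStr (ps : List (String × String)) (s : List Char) : List Char :=
  ps.foldl (fun h p => repl1 p.1.toList p.2.toList h) s

-- the simultaneous scan (string part) and its sequence of matched keys
def scanS (ps : List (String × String)) (l : List Char) : List Char :=
  match l with
  | [] => []
  | c :: t =>
    match pvFind ps (c :: t) with
    | some p => p.2.toList ++ scanS ps (t.drop (p.1.toList.length - 1))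
    | none => c :: scanS ps t
  termination_by l.length
  decreasing_by all_goals (simp; try omega)

def matchesL (ps : List (String × String)) (l : List Char) : List String :=
  match l with
  | [] => []
  | c :: t =>
    match pvFind ps (c :: t) with
    | some p => p.1 :: matchesL ps (t.drop (p.1.toList.length - 1))
    | none => matchesL ps t
  termination_by l.length
  decreasing_by all_goals (simp; try omega)

-- A's change list: key, replacement, count on the partially-replaced string
def changeL (ps : List (String × String)) (h : List Char) : List (String × String × Int) :=
  match ps with
  | [] => []
  | p :: ps' =>
    (if 0 < cnt1 p.1.toList h then [(p.1, p.2, (cnt1 p.1.toList h : Int))] else [])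
      ++ changeL ps' (repl1 p.1.toList p.2.toList h)

-- ---- decided facts about the six concrete patterns ----
theorem pat_prefix_eq : ∀ p ∈ pvRepls, ∀ q ∈ pvRepls, q.1.toList.isPrefixOf p.1.toList → p = q := by decide
theorem pat_key_inj : ∀ p ∈ pvRepls, ∀ q ∈ pvRepls, p.1 = q.1 → p = q := by decide
theorem pat_interior : ∀ p ∈ pvRepls, ∀ q ∈ pvRepls, ∀ i, i < p.1.toList.length → 0 < i →
    ¬ q.1.toList.isPrefixOf (p.1.toList.drop i) ∧ ¬ (p.1.toList.drop i).isPrefixOf q.1.toList := by decide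
theorem pat_new : ∀ p ∈ pvRepls, ∀ q ∈ pvRepls, ∀ i, i < p.2.toList.length →
    ¬ q.1.toList.isPrefixOf (p.2.toList.drop i) ∧ ¬ (p.2.toList.drop i).isPrefixOf q.1.toList := by decide
theorem pvRepls_nodup : pvRepls.Nodup := by decide

def SUFF : List (List Char) := pvRepls.flatMap (fun p => p.1.toList.tails.filter (fun w => !w.isEmpty))

theorem suff_ne_nil : ∀ w ∈ SUFF, w ≠ [] := by decide
theorem suff_closed : ∀ w ∈ SUFF, w.tail ≠ [] → w.tail ∈ SUFF := by decide
theorem suff_not_new : ∀ w ∈ SUFF, ∀ p ∈ pvRepls, ¬ w.isPrefixOf p.2.toList ∧ ¬ p.2.toList.isPrefixOf w := by decide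
theorem pat_tail_suff : ∀ p ∈ pvRepls, p.1.toList.tail ≠ [] ∧ p.1.toList.tail ∈ SUFF := by decide

-- ---- basic pvFind lemmas ----
theorem pvFind_eq_none_iff {ps : List (String × String)} {l : List Char} :
    pvFind ps l = none ↔ ∀ p ∈ ps, ¬ p.1.toList.isPrefixOf l := by
  induction ps with
  | nil => simp [pvFind]
  | cons q ps' ih =>
    by_cases hq : q.1.toList.isPrefixOf l
    · constructor
      · intro h; simp [pvFind, hq] at h
      · intro h; exact absurd hq (h q List.mem_cons_self)
    · constructor
      · intro h r hr
        rcases List.mem_cons.1 hr with he | he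
        · subst he; exact hq
        · simp only [pvFind, hq, Bool.false_eq_true, if_false] at h
          exact ih.1 h r he
      · intro h
        simp only [pvFind, hq, Bool.false_eq_true, if_false]
        exact ih.2 (fun r hr => h r (List.mem_cons_of_mem _ hr))

theorem pvFind_eq_some_of_uniq {ps : List (String × String)} {l : List Char} {p : String × String}
    (hm : p ∈ ps) (hpre : p.1.toList.isPrefixOf l)
    (huniq : ∀ q ∈ ps, q.1.toList.isPrefixOf l → q = p) : pvFind ps l = some p := by
  induction ps with
  | nil => simp at hm
  | cons q ps' ih =>
    by_cases hq : q.1.toList.isPrefixOf l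
    · have : q = p := huniq q List.mem_cons_self hq
      subst this; simp [pvFind, hq]
    · have hm' : p ∈ ps' := by
        rcases List.mem_cons.1 hm with h | h
        · subst h; exact absurd hpre hq
        · exact h
      simp only [pvFind, hq, Bool.false_eq_true, if_false]
      exact ih hm' (fun r hr hrp => huniq r (List.mem_cons_of_mem _ hr) hrp)

theorem uniq_match {p q : String × String} {l : List Char} (hp : p ∈ pvRepls) (hq : q ∈ pvRepls)
    (h1 : p.1.toList.isPrefixOf l) (h2 : q.1.toList.isPrefixOf l) : p = q := by
  rcases List.prefix_or_prefix_of_prefix (List.isPrefixOf_iff_prefix.1 h1)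
      (List.isPrefixOf_iff_prefix.1 h2) with h | h
  · exact (pat_prefix_eq q hq p hp (List.isPrefixOf_iff_prefix.2 h)).symm
  · exact pat_prefix_eq p hp q hq (List.isPrefixOf_iff_prefix.2 h)

-- ---- skip lemmas: a pattern that matches nowhere in a prefix is transparent ----
theorem skip_old {p q : String × String} (hp : p ∈ pvRepls) (hq : q ∈ pvRepls) (hne : q ≠ p)
    (X : List Char) : ∀ i < p.1.toList.length, ¬ q.1.toList.isPrefixOf (List.drop i (p.1.toList ++ X)) := by
  intro i hi hpre
  rw [List.drop_append_of_le_length (Nat.le_of_lt hi)] at hpre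
  have hd : p.1.toList.drop i <+: (p.1.toList.drop i ++ X) := List.prefix_append _ _
  rcases List.prefix_or_prefix_of_prefix (List.isPrefixOf_iff_prefix.1 hpre) hd with h | h
  · rcases Nat.eq_zero_or_pos i with hz | hz
    · subst hz; simp at h
      exact hne (pat_prefix_eq p hp q hq (List.isPrefixOf_iff_prefix.2 h)).symm
    · exact (pat_interior p hp q hq i hi hz).1 (List.isPrefixOf_iff_prefix.2 h)
  · rcases Nat.eq_zero_or_pos i with hz | hz
    · subst hz; simp at h
      exact hne (pat_prefix_eq q hq p hp (List.isPrefixOf_iff_prefix.2 h))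
    · exact (pat_interior p hp q hq i hi hz).2 (List.isPrefixOf_iff_prefix.2 h)

theorem skip_new {p q : String × String} (hp : p ∈ pvRepls) (hq : q ∈ pvRepls)
    (X : List Char) : ∀ i < p.2.toList.length, ¬ q.1.toList.isPrefixOf (List.drop i (p.2.toList ++ X)) := by
  intro i hi hpre
  rw [List.drop_append_of_le_length (Nat.le_of_lt hi)] at hpre
  have hd : p.2.toList.drop i <+: (p.2.toList.drop i ++ X) := List.prefix_append _ _
  rcases List.prefix_or_prefix_of_prefix (List.isPrefixOf_iff_prefix.1 hpre) hd with h | h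
  · exact (pat_new p hp q hq i hi).1 (List.isPrefixOf_iff_prefix.2 h)
  · exact (pat_new p hp q hq i hi).2 (List.isPrefixOf_iff_prefix.2 h)

theorem cnt1_append_skip {o : List Char} (a X : List Char)
    (h : ∀ i < a.length, ¬ o.isPrefixOf (List.drop i (a ++ X))) : cnt1 o (a ++ X) = cnt1 o X := by
  induction a with
  | nil => rfl
  | cons b a' ih =>
    have h0 : ¬ o.isPrefixOf (b :: (a' ++ X)) := by
      have := h 0 (by simp); simpa using this
    rw [List.cons_append, cnt1, if_neg h0]
    exact ih (fun i hi => by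
      have := h (i + 1) (by simp; omega); simpa using this)

theorem repl1_append_skip {o n : List Char} (a X : List Char)
    (h : ∀ i < a.length, ¬ o.isPrefixOf (List.drop i (a ++ X))) :
    repl1 o n (a ++ X) = a ++ repl1 o n X := by
  induction a with
  | nil => rfl
  | cons b a' ih =>
    have h0 : ¬ o.isPrefixOf (b :: (a' ++ X)) := by
      have := h 0 (by simp); simpa using this
    rw [List.cons_append, repl1, if_neg h0, List.cons_append]
    rw [ih (fun i hi => by
      have := h (i + 1) (by simp; omega); simpa using this)]

theorem scanS_append_skip {ps : List (String × String)} (a X : List Char)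
    (h : ∀ q ∈ ps, ∀ i < a.length, ¬ q.1.toList.isPrefixOf (List.drop i (a ++ X))) :
    scanS ps (a ++ X) = a ++ scanS ps X := by
  induction a with
  | nil => rfl
  | cons b a' ih =>
    have h0 : pvFind ps (b :: (a' ++ X)) = none := by
      rw [pvFind_eq_none_iff]
      intro q hq
      have := h q hq 0 (by simp); simpa using this
    rw [List.cons_append, scanS, h0, List.cons_append]
    rw [ih (fun q hq i hi => by
      have := h q hq (i + 1) (by simp; omega); simpa using this)]

theorem cnt1_append_self {o : List Char} (ho : o ≠ []) (X : List Char) :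
    cnt1 o (o ++ X) = 1 + cnt1 o X := by
  cases o with
  | nil => exact absurd rfl ho
  | cons c o' =>
    have hp : (c :: o').isPrefixOf ((c :: o') ++ X) := List.isPrefixOf_iff_prefix.2 (List.prefix_append _ _)
    rw [List.cons_append, cnt1, if_pos (by simpa using hp)]
    simp [List.drop_left]

theorem repl1_append_self {o n : List Char} (ho : o ≠ []) (X : List Char) :
    repl1 o n (o ++ X) = n ++ repl1 o n X := by
  cases o with
  | nil => exact absurd rfl ho
  | cons c o' =>
    have hp : (c :: o').isPrefixOf ((c :: o') ++ X) := List.isPrefixOf_iff_prefix.2 (List.prefix_append _ _)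
    rw [List.cons_append, repl1, if_pos (by simpa using hp)]
    simp [List.drop_left]

theorem scanS_nil_ps (l : List Char) : scanS [] l = l := by
  induction l with
  | nil => rw [scanS]
  | cons c t ih => rw [scanS, show pvFind [] (c :: t) = none from rfl, ih]

theorem seqStr_nil (ps : List (String × String)) : seqStr ps [] = [] := by
  induction ps with
  | nil => rfl
  | cons p ps' ih => simp only [seqStr, List.foldl_cons, repl1] at *; exact ih

theorem scanS_cons_some {ps : List (String × String)} {c : Char} {t : List Char}
    {p : String × String} (h : pvFind ps (c :: t) = some p) :
    scanS ps (c :: t) = p.2.toList ++ scanS ps (t.drop (p.1.toList.length - 1)) := by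
  rw [scanS, h]

theorem scanS_cons_none {ps : List (String × String)} {c : Char} {t : List Char}
    (h : pvFind ps (c :: t) = none) : scanS ps (c :: t) = c :: scanS ps t := by
  rw [scanS, h]

theorem matchesL_cons_some {ps : List (String × String)} {c : Char} {t : List Char}
    {p : String × String} (h : pvFind ps (c :: t) = some p) :
    matchesL ps (c :: t) = p.1 :: matchesL ps (t.drop (p.1.toList.length - 1)) := by
  rw [matchesL, h]

theorem matchesL_cons_none {ps : List (String × String)} {c : Char} {t : List Char}
    (h : pvFind ps (c :: t) = none) : matchesL ps (c :: t) = matchesL ps t := by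
  rw [matchesL, h]

-- ---- head safety: scanning the tail never creates a fresh pattern match at the head ----
theorem head_safe_aux : ∀ N (l : List Char), l.length ≤ N → ∀ ps, (∀ p ∈ ps, p ∈ pvRepls) →
    ∀ w ∈ SUFF, w.isPrefixOf (scanS ps l) → w.isPrefixOf l := by
  intro N
  induction N with
  | zero =>
    intro l hl ps hps w hw hpre
    have : l = [] := by cases l <;> simp_all
    subst this; rw [scanS] at hpre; exact hpre
  | succ N ih =>
    intro l hl ps hps w hw hpre
    cases l with
    | nil => rw [scanS] at hpre; exact hpre
    | cons c t =>
      have ht : t.length ≤ N := by simp at hl; omega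
      cases hf : pvFind ps (c :: t) with
      | some p =>
        rw [scanS_cons_some hf] at hpre
        obtain ⟨hpm, hppre⟩ := pvFind_eq_some_mem hf
        have hpR := hps p hpm
        have hd : p.2.toList <+: (p.2.toList ++ scanS ps (t.drop (p.1.toList.length - 1))) :=
          List.prefix_append _ _
        rcases List.prefix_or_prefix_of_prefix (List.isPrefixOf_iff_prefix.1 hpre) hd with h | h
        · exact absurd (List.isPrefixOf_iff_prefix.2 h) (suff_not_new w hw p hpR).1
        · exact absurd (List.isPrefixOf_iff_prefix.2 h) (suff_not_new w hw p hpR).2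
      | none =>
        rw [scanS_cons_none hf] at hpre
        cases w with
        | nil => exact absurd rfl (suff_ne_nil [] hw)
        | cons d w' =>
          simp only [List.isPrefixOf, Bool.and_eq_true, beq_iff_eq] at hpre
          obtain ⟨hdc, hpre'⟩ := hpre
          subst hdc
          by_cases hw' : w' = []
          · subst hw'; simp [List.isPrefixOf]
          · have hw'S : w' ∈ SUFF := suff_closed (d :: w') hw (by simpa using hw')
            have hwt := ih t ht ps hps w' hw'S hpre'
            simp only [List.isPrefixOf, Bool.and_eq_true, beq_iff_eq]
            exact ⟨trivial, hwt⟩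

theorem head_safe {ps : List (String × String)} {p : String × String} {c : Char} {t : List Char}
    (hps : ∀ q ∈ ps, q ∈ pvRepls) (hp : p ∈ pvRepls)
    (h : ¬ p.1.toList.isPrefixOf (c :: t)) : ¬ p.1.toList.isPrefixOf (c :: scanS ps t) := by
  intro hcon
  obtain ⟨htne, htS⟩ := pat_tail_suff p hp
  cases ho : p.1.toList with
  | nil => rw [ho] at hcon h; exact h hcon
  | cons d v =>
    rw [ho] at hcon
    simp only [List.isPrefixOf, Bool.and_eq_true, beq_iff_eq] at hcon
    obtain ⟨hdc, hvpre⟩ := hcon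
    subst hdc
    rw [ho] at htne htS; simp only [List.tail_cons] at htne htS
    have hvt := head_safe_aux t.length t (le_refl _) ps hps v htS hvpre
    apply h
    rw [ho]
    simp only [List.isPrefixOf, Bool.and_eq_true, beq_iff_eq]
    exact ⟨trivial, hvt⟩

theorem take_succ_decomp {α} (l : List α) (hnd : l.Nodup) (k : Nat) (hk : k < l.length) :
    ∃ q, l.take (k+1) = l.take k ++ [q] ∧ q ∈ l ∧ q ∉ l.take k := by
  refine ⟨l[k], ?_, List.getElem_mem hk, ?_⟩
  · rw [List.take_succ, List.getElem?_eq_getElem hk]; rfl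
  · intro hmem
    have hsl : (l.take (k+1)).Nodup := (List.take_sublist _ _).nodup hnd
    rw [List.take_succ, List.getElem?_eq_getElem hk] at hsl
    rcases List.nodup_append.1 hsl with ⟨-, -, hdisj⟩
    exact hdisj _ hmem _ (by simp) rfl

theorem seqStr_append_singleton (ps : List (String × String)) (q : String × String) (s : List Char) :
    seqStr (ps ++ [q]) s = repl1 q.1.toList q.2.toList (seqStr ps s) := by
  simp only [seqStr, List.foldl_append, List.foldl_cons, List.foldl_nil]

-- ---- the main simultaneous-vs-sequential theorem ----
theorem main_thm : ∀ N (s : List Char), s.length ≤ N → ∀ k, k ≤ 6 →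
    (seqStr (pvRepls.take k) s = scanS (pvRepls.take k) s) ∧
    (∀ p ∈ pvRepls, p ∉ pvRepls.take k →
      cnt1 p.1.toList (scanS (pvRepls.take k) s) = (matchesL pvRepls s).count p.1) := by
  intro N
  induction N with
  | zero =>
    intro s hs k hk
    have : s = [] := by cases s <;> simp_all
    subst this
    constructor
    · rw [seqStr_nil, scanS]
    · intro p hp hnp
      rw [scanS, matchesL, cnt1]
      simp
  | succ N ih =>
    intro s hs k hk
    cases s with
    | nil =>
      constructor
      · rw [seqStr_nil, scanS]
      · intro p hp hnp
        rw [scanS, matchesL, cnt1]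
        simp
    | cons c t =>
      have ht : t.length ≤ N := by simp at hs; omega
      have hlen6 : pvRepls.length = 6 := rfl
      have hsub : ∀ j, ∀ q ∈ pvRepls.take j, q ∈ pvRepls := fun j q hq => List.mem_of_mem_take hq
      cases hfull : pvFind pvRepls (c :: t) with
      | none =>
        have hnp : ∀ p ∈ pvRepls, ¬ p.1.toList.isPrefixOf (c :: t) := pvFind_eq_none_iff.1 hfull
        have hnone : ∀ j, pvFind (pvRepls.take j) (c :: t) = none :=
          fun j => pvFind_eq_none_iff.2 (fun q hq => hnp q (hsub j q hq))
        constructor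
        · induction k with
          | zero => simp only [List.take_zero]; rw [scanS_nil_ps]; rfl
          | succ k ihk =>
            have hk1 : k + 1 ≤ 6 := hk
            have hk6 : k ≤ 6 := by omega
            obtain ⟨q, htake, hq, hqnotin⟩ :=
              take_succ_decomp pvRepls pvRepls_nodup k (by omega)
            have hG1k := ihk hk6
            have hseq : seqStr (pvRepls.take (k+1)) (c :: t) =
                repl1 q.1.toList q.2.toList (seqStr (pvRepls.take k) (c :: t)) := by
              rw [htake, seqStr_append_singleton]
            rw [hseq, hG1k, scanS_cons_none (hnone k), scanS_cons_none (hnone (k+1))]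
            have hnq : ¬ q.1.toList.isPrefixOf (c :: scanS (pvRepls.take k) t) :=
              head_safe (hsub k) hq (hnp _ hq)
            rw [repl1, if_neg hnq]
            congr 1
            rw [← (ih t ht k hk6).1]
            have e2 : repl1 q.1.toList q.2.toList (seqStr (pvRepls.take k) t) =
                seqStr (pvRepls.take (k+1)) t := by
              rw [htake, seqStr_append_singleton]
            rw [e2]
            exact (ih t ht (k+1) hk1).1
        · intro p hp hnpk
          rw [scanS_cons_none (hnone k), matchesL_cons_none hfull]
          have hcp : ¬ p.1.toList.isPrefixOf (c :: scanS (pvRepls.take k) t) :=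
            head_safe (hsub k) hp (hnp p hp)
          rw [cnt1, if_neg hcp]
          exact (ih t ht k hk).2 p hp hnpk
      | some pm =>
        obtain ⟨hpmR, hpmpre⟩ := pvFind_eq_some_mem hfull
        have hpos : 0 < pm.1.toList.length := pvRepls_key_pos pm hpmR
        have hone : pm.1.toList ≠ [] := by intro he; rw [he] at hpos; simp at hpos
        obtain ⟨u, hu⟩ := List.isPrefixOf_iff_prefix.1 hpmpre
        have hru : t.drop (pm.1.toList.length - 1) = u := by
          have h1 : (pm.1.toList ++ u).drop pm.1.toList.length = u := by simp
          rw [hu] at h1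
          cases ho : pm.1.toList with
          | nil => exact absurd ho hone
          | cons d v =>
            rw [ho] at h1
            simpa using h1
        have hur : u.length ≤ N := by
          have hlu := congrArg List.length hu
          rw [List.length_append] at hlu
          simp only [List.length_cons] at hlu
          omega
        have huniq : ∀ r ∈ pvRepls, r.1.toList.isPrefixOf (c :: t) → r = pm :=
          fun r hr hrp => uniq_match hr hpmR hrp hpmpre
        have hMs : matchesL pvRepls (c :: t) = pm.1 :: matchesL pvRepls u := by
          rw [matchesL_cons_some hfull, hru]
        have hfk_some : ∀ j, pm ∈ pvRepls.take j → pvFind (pvRepls.take j) (c :: t) = some pm :=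
          fun j hj => pvFind_eq_some_of_uniq hj hpmpre (fun r hr hrp => huniq r (hsub j r hr) hrp)
        have hfk_none : ∀ j, pm ∉ pvRepls.take j → pvFind (pvRepls.take j) (c :: t) = none := by
          intro j hj
          exact pvFind_eq_none_iff.2 (fun r hr hrp => hj ((huniq r (hsub j r hr) hrp) ▸ hr))
        have hdecomp : ∀ j, pm ∉ pvRepls.take j →
            scanS (pvRepls.take j) (c :: t) = pm.1.toList ++ scanS (pvRepls.take j) u := by
          intro j hj
          rw [← hu]
          exact scanS_append_skip _ _ (fun r hr i hi =>
            skip_old hpmR (hsub j r hr) (fun he => hj (he ▸ hr)) u i hi)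
        constructor
        · induction k with
          | zero => simp only [List.take_zero]; rw [scanS_nil_ps]; rfl
          | succ k ihk =>
            have hk1 : k + 1 ≤ 6 := hk
            have hk6 : k ≤ 6 := by omega
            obtain ⟨q, htake, hq, hqnotin⟩ :=
              take_succ_decomp pvRepls pvRepls_nodup k (by omega)
            have hG1k := ihk hk6
            have hseq : seqStr (pvRepls.take (k+1)) (c :: t) =
                repl1 q.1.toList q.2.toList (seqStr (pvRepls.take k) (c :: t)) := by
              rw [htake, seqStr_append_singleton]
            have hchain : repl1 q.1.toList q.2.toList (scanS (pvRepls.take k) u) =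
                scanS (pvRepls.take (k+1)) u := by
              rw [← (ih u hur k hk6).1]
              have e2 : repl1 q.1.toList q.2.toList (seqStr (pvRepls.take k) u) =
                  seqStr (pvRepls.take (k+1)) u := by
                rw [htake, seqStr_append_singleton]
              rw [e2]
              exact (ih u hur (k+1) hk1).1
            rw [hseq, hG1k]
            by_cases hpmk : pm ∈ pvRepls.take k
            · have hpmk1 : pm ∈ pvRepls.take (k+1) := by
                rw [htake]; exact List.mem_append_left _ hpmk
              rw [scanS_cons_some (hfk_some k hpmk), hru]
              rw [repl1_append_skip _ _ (skip_new hpmR hq _)]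
              rw [scanS_cons_some (hfk_some (k+1) hpmk1), hru]
              rw [hchain]
            · rw [hdecomp k hpmk]
              by_cases hqpm : q = pm
              · have hpmk1 : pm ∈ pvRepls.take (k+1) := by
                  rw [htake]; exact List.mem_append_right _ (by simp [hqpm])
                rw [hqpm, repl1_append_self hone]
                rw [scanS_cons_some (hfk_some (k+1) hpmk1), hru]
                rw [← hqpm, hchain]
              · rw [repl1_append_skip _ _ (skip_old hpmR hq hqpm _)]
                have hpm1 : pm ∉ pvRepls.take (k+1) := by
                  rw [htake]
                  intro hmem
                  rcases List.mem_append.1 hmem with h | h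
                  · exact hpmk h
                  · simp at h; exact hqpm h.symm
                rw [hdecomp (k+1) hpm1, hchain]
        · intro p hp hnpk
          rw [hMs]
          by_cases hpmk : pm ∈ pvRepls.take k
          · rw [scanS_cons_some (hfk_some k hpmk), hru]
            have hpne : p ≠ pm := fun he => hnpk (he ▸ hpmk)
            have hkne : p.1 ≠ pm.1 := fun he => hpne (pat_key_inj p hp pm hpmR he)
            rw [cnt1_append_skip _ _ (skip_new hpmR hp _)]
            rw [(ih u hur k hk).2 p hp hnpk]
            rw [List.count_cons_of_ne hkne.symm]
          · rw [hdecomp k hpmk]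
            by_cases hppm : p = pm
            · subst hppm
              rw [cnt1_append_self hone]
              rw [(ih u hur k hk).2 p hp hnpk]
              rw [List.count_cons_self]
              omega
            · have hkne : p.1 ≠ pm.1 := fun he => hppm (pat_key_inj p hp pm hpmR he)
              rw [cnt1_append_skip _ _ (skip_old hpmR hp hppm _)]
              rw [(ih u hur k hk).2 p hp hnpk]
              rw [List.count_cons_of_ne hkne.symm]

theorem repl1_of_cnt_zero (o n : List Char) : ∀ N l, l.length ≤ N → cnt1 o l = 0 → repl1 o n l = l := by
  intro N
  induction N with
  | zero =>
    intro l hl _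
    have : l = [] := by cases l <;> simp_all
    subst this; rw [repl1]
  | succ N ihN =>
    intro l hl hc
    cases l with
    | nil => rw [repl1]
    | cons c t =>
      have ht : t.length ≤ N := by simp at hl; omega
      by_cases hp : o.isPrefixOf (c :: t)
      · rw [cnt1, if_pos hp] at hc; omega
      · rw [cnt1, if_neg hp] at hc
        rw [repl1, if_neg hp, ihN t ht hc]

theorem take_drop_decomp {α} (l : List α) (hnd : l.Nodup) (k : Nat) (hk : k < l.length) :
    ∃ q, l.take (k+1) = l.take k ++ [q] ∧ l.drop k = q :: l.drop (k+1) ∧ q ∈ l ∧ q ∉ l.take k := by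
  refine ⟨l[k], ?_, List.drop_eq_getElem_cons hk, List.getElem_mem hk, ?_⟩
  · rw [List.take_succ, List.getElem?_eq_getElem hk]; rfl
  · intro hmem
    have hsl : (l.take (k+1)).Nodup := (List.take_sublist _ _).nodup hnd
    rw [List.take_succ, List.getElem?_eq_getElem hk] at hsl
    rcases List.nodup_append.1 hsl with ⟨-, -, hdisj⟩
    exact hdisj _ hmem _ (by simp) rfl

theorem changeL_keys_sublist : ∀ (ps : List (String × String)) (h : List Char),
    List.Sublist ((changeL ps h).map Prod.fst) (ps.map Prod.fst) := by
  intro ps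
  induction ps with
  | nil => intro h; simp [changeL]
  | cons p ps' ihp =>
    intro h
    rw [changeL]
    by_cases hpos : 0 < cnt1 p.1.toList h
    · rw [if_pos hpos]
      simp only [List.map_append, List.map_cons, List.map_nil, List.singleton_append]
      exact List.Sublist.cons₂ _ (ihp _)
    · rw [if_neg hpos]
      simp only [List.nil_append, List.map_cons]
      exact (ihp _).trans (List.sublist_cons_self _ _)

theorem pvScanGo_eq : ∀ N (l : List Char), l.length ≤ N → ∀ out d, pvScanGo l out d =
    (out ++ scanS pvRepls l,
     (matchesL pvRepls l).foldl (fun d k => d.insert k (d.getD k 0 + 1)) d) := by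
  intro N
  induction N with
  | zero =>
    intro l hl out d
    have : l = [] := by cases l <;> simp_all
    subst this
    rw [pvScanGo, scanS, matchesL]
    simp
  | succ N ihN =>
    intro l hl out d
    cases l with
    | nil => rw [pvScanGo, scanS, matchesL]; simp
    | cons c t =>
      have ht : t.length ≤ N := by simp at hl; omega
      rw [pvScanGo]
      cases hf : pvFind pvRepls (c :: t) with
      | some p =>
        obtain ⟨hpm, hppre⟩ := pvFind_eq_some_mem hf
        have hpos := pvRepls_key_pos p hpm
        have hdrop : (c :: t).drop p.1.toList.length = t.drop (p.1.toList.length - 1) := by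
          cases hop : p.1.toList with
          | nil => rw [hop] at hpos; simp at hpos
          | cons a o' => simp
        have hle : (t.drop (p.1.toList.length - 1)).length ≤ N := by simp; omega
        simp only [hf]
        rw [hdrop, ihN _ hle, scanS_cons_some hf, matchesL_cons_some hf]
        simp [List.append_assoc]
      | none =>
        simp only [hf]
        rw [ihN _ ht, scanS_cons_none hf, matchesL_cons_none hf]
        simp

-- ---- characterizations of the two ports ----
theorem afold_char : ∀ (ps : List (String × String)), (∀ p ∈ ps, p ∈ pvRepls) →
    ∀ (str : String) (d : PySem.Dict String (String × Int)),
    ps.foldl (fun (st : String × PySem.Dict String (String × Int)) p =>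
      let count := PySem.Str.count st.1 p.1
      if 0 < count then
        (PySem.Str.replace st.1 p.1 p.2, st.2.insert p.1 (p.2, (count : Int)))
      else st) (str, d)
    = (String.ofList (seqStr ps str.toList),
       (changeL ps str.toList).foldl (fun d kv => d.insert kv.1 kv.2) d) := by
  intro ps
  induction ps with
  | nil =>
    intro _ str d
    simp [seqStr, changeL, String.ofList_toList]
  | cons p ps' ihp =>
    intro hmem str d
    have hpR : p ∈ pvRepls := hmem p List.mem_cons_self
    have hmem' : ∀ r ∈ ps', r ∈ pvRepls := fun r hr => hmem r (List.mem_cons_of_mem _ hr)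
    have hone : p.1.toList ≠ [] := by
      have := pvRepls_key_pos p hpR
      intro he; rw [he] at this; simp at this
    have hc : PySem.Str.count str p.1 = cnt1 p.1.toList str.toList := by
      rw [PySem.Str.count, count_eq_cnt1 _ _ hone]
    have hr : (PySem.Str.replace str p.1 p.2).toList = repl1 p.1.toList p.2.toList str.toList := by
      rw [PySem.Str.replace, String.toList_ofList, replace_eq_repl1 _ _ _ hone]
    simp only [List.foldl_cons]
    simp only [hc]
    by_cases hpos : 0 < cnt1 p.1.toList str.toList
    · rw [if_pos hpos]
      rw [ihp hmem' (PySem.Str.replace str p.1 p.2) (d.insert p.1 (p.2, (cnt1 p.1.toList str.toList : Int)))]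
      rw [hr]
      have hseqc : seqStr (p :: ps') str.toList = seqStr ps' (repl1 p.1.toList p.2.toList str.toList) := by
        simp [seqStr]
      rw [hseqc, changeL, if_pos hpos]
      simp [List.foldl_cons]
    · rw [if_neg hpos]
      rw [ihp hmem' str d]
      have hz : cnt1 p.1.toList str.toList = 0 := by omega
      have hid := repl1_of_cnt_zero p.1.toList p.2.toList str.toList.length str.toList (le_refl _) hz
      have hseqc : seqStr (p :: ps') str.toList = seqStr ps' str.toList := by
        simp [seqStr, hid]
      rw [hseqc, changeL, if_neg hpos, hid]
      simp

theorem a_char (html : String) :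
    migrate_data_attributes html =
      (String.ofList (seqStr pvRepls html.toList), changeL pvRepls html.toList) := by
  have e1 : migrate_data_attributes html =
      (fun z : String × PySem.Dict String (String × Int) => (z.1, z.2.items))
        (List.foldl (fun (st : String × PySem.Dict String (String × Int)) p =>
          let count := PySem.Str.count st.1 p.1
          if 0 < count then
            (PySem.Str.replace st.1 p.1 p.2, st.2.insert p.1 (p.2, (count : Int)))
          else st) (html, PySem.Dict.empty)
          ([("data-toggle=", "data-bs-toggle="), ("data-target=", "data-bs-target="),
     ("data-dismiss=", "data-bs-dismiss="), ("data-parent=", "data-bs-parent="),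
     ("data-slide=", "data-bs-slide="), ("data-slide-to=", "data-bs-slide-to=")] : List (String × String))) := by
    simp only [migrate_data_attributes]
  have key := afold_char ([("data-toggle=", "data-bs-toggle="), ("data-target=", "data-bs-target="),
     ("data-dismiss=", "data-bs-dismiss="), ("data-parent=", "data-bs-parent="),
     ("data-slide=", "data-bs-slide="), ("data-slide-to=", "data-bs-slide-to=")] : List (String × String)) (fun p hp => hp) html PySem.Dict.empty
  have e2 := congrArg
    (fun z : String × PySem.Dict String (String × Int) => (z.1, z.2.items)) key
  rw [e1, e2]
  simp only []
  rw [show ([("data-toggle=", "data-bs-toggle="), ("data-target=", "data-bs-target="),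
     ("data-dismiss=", "data-bs-dismiss="), ("data-parent=", "data-bs-parent="),
     ("data-slide=", "data-bs-slide="), ("data-slide-to=", "data-bs-slide-to=")] : List (String × String)) = pvRepls from rfl]
  have hnd : ((changeL pvRepls html.toList).map Prod.fst).Nodup :=
    (changeL_keys_sublist pvRepls html.toList).nodup (by decide)
  have hitems := PySem.Dict.items_foldl_insert_fresh (changeL pvRepls html.toList)
    Prod.fst Prod.snd PySem.Dict.empty (fun a _ => PySem.Dict.contains_empty _) hnd
  simp only [Prod.mk.eta] at hitems
  rw [hitems, show (PySem.Dict.empty : PySem.Dict String (String × Int)).items = [] from rfl,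
    List.nil_append, List.map_id']

theorem b_char (html : String) :
    migrate_data_attributes_alt html =
      (String.ofList (scanS pvRepls html.toList),
       (pvRepls.filter (fun p => decide (p.1 ∈ matchesL pvRepls html.toList))).map
         (fun p => (p.1, p.2, ((matchesL pvRepls html.toList).count p.1 : Int)))) := by
  have e1 : migrate_data_attributes_alt html =
      (fun r : List Char × PySem.Dict String Int =>
        (String.ofList r.1,
         (pvRepls.filter (fun p => r.2.contains p.1)).map
           (fun p => (p.1, p.2, r.2.getD p.1 0))))
        (pvScanGo html.toList [] PySem.Dict.empty) := by
    simp only [migrate_data_attributes_alt]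
  have key := pvScanGo_eq html.toList.length html.toList (le_refl _) [] PySem.Dict.empty
  have e2 := congrArg
    (fun r : List Char × PySem.Dict String Int =>
      (String.ofList r.1,
       (pvRepls.filter (fun p => r.2.contains p.1)).map
         (fun p => (p.1, p.2, r.2.getD p.1 0)))) key
  rw [e1, e2]
  rw [PySem.Dict.foldl_insert_getD_add_one_eq_counter]
  simp only [List.nil_append]
  have hfil : (pvRepls.filter
      (fun p => (PySem.Dict.counter (matchesL pvRepls html.toList)).contains p.1))
      = pvRepls.filter (fun p => decide (p.1 ∈ matchesL pvRepls html.toList)) := by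
    apply List.filter_congr
    intro a _
    rw [PySem.Dict.contains_counter]
    simp
  rw [hfil]
  have hmap : (pvRepls.filter (fun p => decide (p.1 ∈ matchesL pvRepls html.toList))).map
        (fun p => (p.1, p.2, (PySem.Dict.counter (matchesL pvRepls html.toList)).getD p.1 0))
      = (pvRepls.filter (fun p => decide (p.1 ∈ matchesL pvRepls html.toList))).map
        (fun p => (p.1, p.2, ((matchesL pvRepls html.toList).count p.1 : Int))) :=
    List.map_congr_left (fun a _ => by rw [PySem.Dict.getD_counter])
  rw [hmap]

theorem changeL_chain_aux (s : List Char) : ∀ j k, k + j = 6 →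
    changeL (pvRepls.drop k) (seqStr (pvRepls.take k) s) =
      ((pvRepls.drop k).filter (fun p => decide (p.1 ∈ matchesL pvRepls s))).map
        (fun p => (p.1, p.2, ((matchesL pvRepls s).count p.1 : Int))) := by
  intro j
  induction j with
  | zero =>
    intro k hk
    have : k = 6 := by omega
    subst this
    rw [show pvRepls.drop 6 = [] from rfl]
    simp [changeL]
  | succ j ihj =>
    intro k hk
    have hlen : pvRepls.length = 6 := rfl
    obtain ⟨q, htake, hdrop, hq, hqn⟩ :=
      take_drop_decomp pvRepls pvRepls_nodup k (by omega)
    rw [hdrop, changeL]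
    have hG := main_thm s.length s (le_refl _) k (by omega)
    have hcnt : cnt1 q.1.toList (seqStr (pvRepls.take k) s) = (matchesL pvRepls s).count q.1 := by
      rw [hG.1]; exact hG.2 q hq hqn
    have hrep : repl1 q.1.toList q.2.toList (seqStr (pvRepls.take k) s) =
        seqStr (pvRepls.take (k+1)) s := by
      rw [htake, seqStr_append_singleton]
    rw [hcnt, hrep, ihj (k+1) (by omega)]
    rw [List.filter_cons]
    by_cases hmem : q.1 ∈ matchesL pvRepls s
    · have hpos : 0 < (matchesL pvRepls s).count q.1 := List.count_pos_iff.2 hmem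
      simp [hmem, hpos]
    · have hzero : (matchesL pvRepls s).count q.1 = 0 := List.count_eq_zero.2 hmem
      simp [hmem, hzero]

theorem changeL_chain (s : List Char) :
    changeL pvRepls s =
      (pvRepls.filter (fun p => decide (p.1 ∈ matchesL pvRepls s))).map
        (fun p => (p.1, p.2, ((matchesL pvRepls s).count p.1 : Int))) := by
  have h := changeL_chain_aux s 6 0 (by omega)
  rw [List.drop_zero, List.take_zero] at h
  simpa [seqStr] using h

-- ===== VERDICT (by name: the statement is the Claim_ definition above) =====
theorem migrate_data_attributes_spec : Claim_equal_migrate_data_attributes := by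
  intro html _
  unfold Spec_migrate_data_attributes
  rw [a_char, b_char]
  have hG1 := (main_thm html.toList.length html.toList (le_refl _) 6 (by omega)).1
  rw [show pvRepls.take 6 = pvRepls from rfl] at hG1
  rw [hG1, changeL_chain]
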